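-- pv_equiv track=rewrite | github.com/EdoardoSarti/locusts | src/locusts/support.py | distribute_items_in_fixed_length_list
-- ===== SOURCE A (Python) =====
-- def distribute_items_in_fixed_length_list(list_length, n_items, min_in_list=None):
--     base = n_items // list_length
--     if min_in_list is not None:
--         if base < min_in_list:
--             list_length = max(1, n_items // min_in_list) # if n_items < min_in_list, reserve a node anyway
--             base = n_items // list_length
--     plus = n_items - base*list_length
--     reslist = [base]*list_length
--     for i in range(plus):
--         reslist[i] += 1
--     return reslist
-- ===== SOURCE B (Python) =====
-- def distribute_items_in_fixed_length_list(list_length, n_items, min_in_list=None):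
--     if min_in_list is not None and n_items // list_length < min_in_list:
--         list_length = max(1, n_items // min_in_list)  # if n_items < min_in_list, reserve a node anyway
--     # slot i holds the ceiling of (n_items - i) / list_length: a per-index
--     # closed form, correct because these L ceilings telescope to n_items and
--     # exceed the floor by exactly one on the first n_items mod list_length slots
--     return [(n_items + list_length - 1 - i) // list_length for i in range(list_length)]
-- ===== Notes on version B (the rewrite author's own statement) =====
-- stated objective: alternative
-- what changed: B drops A's base/plus bookkeeping and increment loop entirely: after the same min_in_list adjustment it computes each slot independently by the closed-form ceiling (n_items + list_length - 1 - i) // list_length in one comprehension.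
import Mathlib
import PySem

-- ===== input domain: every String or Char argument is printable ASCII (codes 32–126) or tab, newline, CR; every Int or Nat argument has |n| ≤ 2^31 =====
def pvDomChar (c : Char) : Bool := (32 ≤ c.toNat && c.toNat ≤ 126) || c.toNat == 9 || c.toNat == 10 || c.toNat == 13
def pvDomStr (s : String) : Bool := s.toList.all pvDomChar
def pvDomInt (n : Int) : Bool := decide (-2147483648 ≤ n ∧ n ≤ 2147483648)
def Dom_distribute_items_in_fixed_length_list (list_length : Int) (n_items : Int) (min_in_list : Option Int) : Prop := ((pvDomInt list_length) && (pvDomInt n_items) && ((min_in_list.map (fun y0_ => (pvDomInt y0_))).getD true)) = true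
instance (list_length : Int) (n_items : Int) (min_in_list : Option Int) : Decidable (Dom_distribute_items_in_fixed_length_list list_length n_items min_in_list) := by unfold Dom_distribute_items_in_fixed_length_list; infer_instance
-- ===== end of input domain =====

-- B replaces A's base/plus bookkeeping and increment loop by a per-slot
-- closed-form ceiling comprehension (alternative decomposition, no speed claim).

-- ===== PORT A =====
def distribute_items_in_fixed_length_list (list_length : Int) (n_items : Int) (min_in_list : Option Int) : List Int :=
  let base := PySem.Int.floordiv n_items list_length
  let p : Int × Int :=
    match min_in_list with
    | some m =>
        if base < m then
          let list_length := max 1 (PySem.Int.floordiv n_items m)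
          (list_length, PySem.Int.floordiv n_items list_length)
        else (list_length, base)
    | none => (list_length, base)
  let L := p.1
  let base := p.2
  let plus := n_items - base * L
  let reslist := List.replicate L.toNat base
  -- for i in range(plus): reslist[i] += 1   (in-range set; IndexError unreachable under Pre_)
  (PySem.List.pyRange 0 plus 1).foldl (fun acc i => acc.set i.toNat (acc.getD i.toNat 0 + 1)) reslist

-- ===== PORT B =====
def distribute_items_in_fixed_length_list_alt (list_length : Int) (n_items : Int) (min_in_list : Option Int) : List Int :=
  let L :=
    match min_in_list with
    | some m =>
        if PySem.Int.floordiv n_items list_length < m then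
          max 1 (PySem.Int.floordiv n_items m)
        else list_length
    | none => list_length
  (PySem.List.pyRange 0 L 1).map (fun i => PySem.Int.floordiv (n_items + L - 1 - i) L)

-- ===== PRECONDITION & SPEC =====
-- Pre_ excludes exactly the ZeroDivisionError inputs: list_length = 0, or min_in_list = 0
-- while the branch guard base < 0 fires (A raises there; B raises too, except that
-- with list_length = 0 and min_in_list = None B's empty range yields [] without dividing).
def Pre_distribute_items_in_fixed_length_list (list_length : Int) (n_items : Int) (min_in_list : Option Int) : Prop :=
  list_length ≠ 0 ∧ (min_in_list ≠ some 0 ∨ 0 ≤ PySem.Int.floordiv n_items list_length)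
instance (list_length : Int) (n_items : Int) (min_in_list : Option Int) : Decidable (Pre_distribute_items_in_fixed_length_list list_length n_items min_in_list) := by unfold Pre_distribute_items_in_fixed_length_list; infer_instance

def pvWitness_distribute_items_in_fixed_length_list : Int × Int × Option Int := (4, 10, some 2)

def Spec_distribute_items_in_fixed_length_list (list_length : Int) (n_items : Int) (min_in_list : Option Int) (out : List Int) : Prop := out = distribute_items_in_fixed_length_list_alt list_length n_items min_in_list
instance (list_length : Int) (n_items : Int) (min_in_list : Option Int) (out : List Int) : Decidable (Spec_distribute_items_in_fixed_length_list list_length n_items min_in_list out) := by unfold Spec_distribute_items_in_fixed_length_list; infer_instance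

-- ===== CLAIM =====
def Claim_equal_distribute_items_in_fixed_length_list : Prop := ∀ (list_length : Int) (n_items : Int) (min_in_list : Option Int), Dom_distribute_items_in_fixed_length_list list_length n_items min_in_list → Pre_distribute_items_in_fixed_length_list list_length n_items min_in_list → Spec_distribute_items_in_fixed_length_list list_length n_items min_in_list (distribute_items_in_fixed_length_list list_length n_items min_in_list)


-- ===== LEMMAS AND PROOFS =====

-- A's increment loop on a replicate turns the first p cells into b+1
lemma inc_fold_replicate (b : Int) : ∀ (p L : Nat), p ≤ L →
    (List.range p).foldl (fun acc i => acc.set i (acc.getD i 0 + 1)) (List.replicate L b)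
      = List.replicate p (b + 1) ++ List.replicate (L - p) b := by
  intro p
  induction p with
  | zero => intro L _; simp
  | succ q ih =>
    intro L h
    rw [List.range_succ, List.foldl_append, ih L (by omega)]
    have hq : q < L := by omega
    have hlen : (List.replicate q (b + 1)).length = q := by simp
    have hrep : L - q = (L - q - 1) + 1 := by omega
    have hgetD : (List.replicate q (b + 1) ++ List.replicate (L - q) b).getD q 0 = b := by
      rw [hrep, List.replicate_succ, List.getD_eq_getElem?_getD,
        List.getElem?_append_right (le_of_eq hlen), hlen]
      simp
    have hset : (List.replicate q (b + 1) ++ List.replicate (L - q) b).set q (b + 1)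
        = List.replicate (q + 1) (b + 1) ++ List.replicate (L - (q + 1)) b := by
      rw [List.set_append, hrep, List.replicate_succ]
      simp only [hlen, lt_irrefl, if_false, Nat.sub_self, List.set_cons_zero]
      have h3 : L - (q + 1) = L - q - 1 := by omega
      rw [h3, List.replicate_succ' (n := q), List.append_assoc, List.singleton_append]
    simp only [List.foldl_cons, List.foldl_nil, hgetD, hset]

-- B's per-slot closed form equals the two-segment list, L > 0
lemma map_ceil_eq_segments (L n : Int) (hL : 0 < L) :
    (PySem.List.pyRange 0 L 1).map (fun i => PySem.Int.floordiv (n + L - 1 - i) L)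
      = List.replicate (PySem.Int.mod n L).toNat (PySem.Int.floordiv n L + 1)
        ++ List.replicate (L - PySem.Int.mod n L).toNat (PySem.Int.floordiv n L) := by
  set b := PySem.Int.floordiv n L with hb
  set r := PySem.Int.mod n L with hr
  have hnr : b * L + r = n := PySem.Int.floordiv_mul_add_mod n L
  have h0 : 0 ≤ r := PySem.Int.mod_nonneg n hL
  have hlt : r < L := PySem.Int.mod_lt n hL
  apply List.ext_getElem
  · simp [PySem.List.length_pyRange_one]; omega
  · intro k hk1 hk2
    have hkL : k < L.toNat := by
      simpa [PySem.List.length_pyRange_one] using hk1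
    rw [List.getElem_map, PySem.List.getElem_pyRange_one]
    have hkI : (k : Int) < L := by omega
    by_cases hkr : (k : Int) < r
    · have hklen : k < (List.replicate r.toNat (b + 1)).length := by
        simp only [List.length_replicate]; omega
      rw [List.getElem_append_left hklen, List.getElem_replicate]
      rw [PySem.Int.floordiv_eq_iff_of_pos hL]
      constructor <;> nlinarith
    · have hklen : (List.replicate r.toNat (b + 1)).length ≤ k := by
        simp only [List.length_replicate]; omega
      rw [List.getElem_append_right hklen, List.getElem_replicate]
      rw [PySem.Int.floordiv_eq_iff_of_pos hL]
      constructor <;> nlinarith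

-- after the shared adjustment, A's loop result equals B's comprehension, any L ≠ 0
lemma core_eq (L n : Int) (hL : L ≠ 0) :
    (PySem.List.pyRange 0 (n - PySem.Int.floordiv n L * L) 1).foldl
        (fun acc i => acc.set i.toNat (acc.getD i.toNat 0 + 1))
        (List.replicate L.toNat (PySem.Int.floordiv n L))
      = (PySem.List.pyRange 0 L 1).map (fun i => PySem.Int.floordiv (n + L - 1 - i) L) := by
  have hmod : n - PySem.Int.floordiv n L * L = PySem.Int.mod n L := by
    have h := PySem.Int.floordiv_mul_add_mod n L
    linarith
  rw [hmod]
  rcases lt_or_gt_of_ne hL with hneg | hpos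
  · have hb2 := PySem.Int.mod_neg_bounds n (b := L) hneg
    rw [PySem.List.pyRange_one_eq_nil (by omega), PySem.List.pyRange_one_eq_nil (le_of_lt hneg)]
    simp [Int.toNat_of_nonpos (le_of_lt hneg)]
  · have h0 : 0 ≤ PySem.Int.mod n L := PySem.Int.mod_nonneg n hpos
    have hlt : PySem.Int.mod n L < L := PySem.Int.mod_lt n hpos
    rw [map_ceil_eq_segments L n hpos, PySem.List.pyRange_one]
    simp only [sub_zero, List.foldl_map, zero_add, Int.toNat_natCast]
    rw [inc_fold_replicate _ (PySem.Int.mod n L).toNat L.toNat (by omega)]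
    congr 1
    congr 1
    omega

-- ===== VERDICT =====
theorem distribute_items_in_fixed_length_list_spec : Claim_equal_distribute_items_in_fixed_length_list := by
  intro L n m _ hpre
  obtain ⟨hL, _⟩ := hpre
  unfold Spec_distribute_items_in_fixed_length_list distribute_items_in_fixed_length_list
    distribute_items_in_fixed_length_list_alt
  cases m with
  | none => exact core_eq L n hL
  | some mv =>
    by_cases hlt : PySem.Int.floordiv n L < mv
    · simp only [if_pos hlt]
      refine core_eq _ n ?_
      have := le_max_left 1 (PySem.Int.floordiv n mv)
      omega
    · simp only [if_neg hlt]
      exact core_eq L n hL
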